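-- pv_equiv track=rewrite | github.com/guxu313/TeViS | src/tasks/run_task_ordering.py | sortArrayByCollationArray
-- ===== SOURCE A (Python) =====
-- from typing import List
--
-- def sortArrayByCollationArray(originalArray: List[int], collationArray: List[List[int]]) -> List[int]:
--     result = []
--     temporary = [sorted(x)[::-1] for x in collationArray]
--     for oa in originalArray:
--         flag = True
--         for i, ca in enumerate(collationArray):
--             if oa in ca:
--                 result.append(temporary[i][-1])
--                 temporary[i].pop()
--                 flag = False
--                 break
--         if flag:
--             result.append(oa)
--     return result
-- ===== SOURCE B (Python) =====
-- def sortArrayByCollationArray(originalArray, collationArray):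
--     # value -> index of the first group containing it (built once)
--     firstGroup = {}
--     for i, ca in enumerate(collationArray):
--         for v in ca:
--             firstGroup.setdefault(v, i)
--     # per group: ascending sorted values and a pointer to the next (smallest remaining) one
--     sortedGroups = [sorted(ca) for ca in collationArray]
--     ptr = [0] * len(collationArray)
--     out = []
--     for oa in originalArray:
--         i = firstGroup.get(oa)
--         if i is None:
--             out.append(oa)
--         else:
--             out.append(sortedGroups[i][ptr[i]])
--             ptr[i] += 1
--     return out
-- ===== Notes on version B (the rewrite author's own statement) =====
-- stated objective: faster
-- what changed: Replaced the per-element inner scan over all groups and the repeated pop from a descending copy by a value-to-first-group dictionary built once plus per-group ascending sorted lists with advancing pointers.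
import Mathlib
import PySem

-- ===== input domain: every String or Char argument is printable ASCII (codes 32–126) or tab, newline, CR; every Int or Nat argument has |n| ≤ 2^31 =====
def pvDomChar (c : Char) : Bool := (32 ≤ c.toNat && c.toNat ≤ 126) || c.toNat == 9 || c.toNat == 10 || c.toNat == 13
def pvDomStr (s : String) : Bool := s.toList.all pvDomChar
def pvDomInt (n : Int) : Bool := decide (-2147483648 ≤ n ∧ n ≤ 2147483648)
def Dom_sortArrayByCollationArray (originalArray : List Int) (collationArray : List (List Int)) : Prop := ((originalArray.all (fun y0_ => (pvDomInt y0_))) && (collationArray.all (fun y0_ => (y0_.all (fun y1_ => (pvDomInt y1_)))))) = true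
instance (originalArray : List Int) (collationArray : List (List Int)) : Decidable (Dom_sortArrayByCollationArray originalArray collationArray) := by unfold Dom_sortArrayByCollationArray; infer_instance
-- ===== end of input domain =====

-- B replaces A's per-element scan over all groups (and the descending copies popped from the end)
-- by a value→first-group dictionary built once plus per-group ascending sorted lists with advancing
-- pointers: objective 'faster' (asymptotic: the inner scan over groups disappears).

-- ===== PORT A =====
-- sorted(x)[::-1] is ported as (sorted x).reverse (a [::-1] slice is an exact reversal);
-- temporary[i][-1] is pyGet? (-1) (none = IndexError, excluded by Pre_) with .getD 0;
-- temporary[i].pop() is ported as dropLast (exact on nonempty lists, which Pre_ guarantees).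
def sortArrayByCollationArray (originalArray : List Int) (collationArray : List (List Int)) : List Int :=
  let temporary := collationArray.map (fun x => (PySem.List.sorted x (fun v => v) false).reverse)
  (originalArray.foldl
    (fun (st : List Int × List (List Int)) oa =>
      -- 'for i, ca in enumerate(collationArray): if oa in ca: … break' = first index whose group contains oa
      match collationArray.findIdx? (fun ca => ca.contains oa) with
      | some i =>
          let t := st.2.getD i []
          (st.1 ++ [(PySem.List.pyGet? t (-1)).getD 0], st.2.set i t.dropLast)
      | none => (st.1 ++ [oa], st.2))
    ([], temporary)).1

-- ===== PORT B =====
-- sortedGroups[i][ptr[i]] raises IndexError exactly where A raises; ported with .getD 0 under Pre_.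
-- enumerate yields Int group indices (always ≥ 0 here), hence the .toNat on list indexing.
def sortArrayByCollationArray_alt (originalArray : List Int) (collationArray : List (List Int)) : List Int :=
  let firstGroup : PySem.Dict Int Int :=
    (PySem.List.enumerate collationArray 0).foldl
      (fun d p => p.2.foldl (fun d v => d.setdefault v p.1) d) PySem.Dict.empty
  let sortedGroups := collationArray.map (fun ca => PySem.List.sorted ca (fun v => v) false)
  let ptr : List Int := List.replicate collationArray.length 0
  (originalArray.foldl
    (fun (st : List Int × List Int) oa =>
      match firstGroup.get? oa with
      | none => (st.1 ++ [oa], st.2)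
      | some i =>
          let p := st.2.getD i.toNat 0
          (st.1 ++ [(sortedGroups.getD i.toNat []).getD p.toNat 0], st.2.set i.toNat (p + 1)))
    ([], ptr)).1

-- ===== PRECONDITION & SPEC =====
-- the index of the first group of collationArray containing x (none if no group contains x)
def pvFirstIdx (collationArray : List (List Int)) (x : Int) : Option Nat :=
  collationArray.findIdx? (fun ca => ca.contains x)

-- A raises IndexError exactly when some group is asked for more values than it holds:
-- Pre_ requires, for every group i, that at most |group i| elements of originalArray have i as
-- their first containing group. It excludes nothing on which A returns normally.
def Pre_sortArrayByCollationArray (originalArray : List Int) (collationArray : List (List Int)) : Prop :=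
  ∀ i, i < collationArray.length →
    originalArray.countP (fun x => decide (pvFirstIdx collationArray x = some i))
      ≤ (collationArray.getD i []).length

instance (originalArray : List Int) (collationArray : List (List Int)) : Decidable (Pre_sortArrayByCollationArray originalArray collationArray) := by unfold Pre_sortArrayByCollationArray; infer_instance

def pvWitness_sortArrayByCollationArray : List Int × List (List Int) := ([1, 2, 2], [[2, 2, 3], [5]])

def Spec_sortArrayByCollationArray (originalArray : List Int) (collationArray : List (List Int)) (out : List Int) : Prop := out = sortArrayByCollationArray_alt originalArray collationArray
instance (originalArray : List Int) (collationArray : List (List Int)) (out : List Int) : Decidable (Spec_sortArrayByCollationArray originalArray collationArray out) := by unfold Spec_sortArrayByCollationArray; infer_instance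

-- ===== CLAIM (what is proved, stated in full; the proofs are below) =====
def Claim_equal_sortArrayByCollationArray : Prop := ∀ (originalArray : List Int) (collationArray : List (List Int)), Dom_sortArrayByCollationArray originalArray collationArray → Pre_sortArrayByCollationArray originalArray collationArray → Spec_sortArrayByCollationArray originalArray collationArray (sortArrayByCollationArray originalArray collationArray)

-- ===== LEMMAS AND PROOFS =====

-- the i-th group sorted ascending
def pvS (col : List (List Int)) (i : Nat) : List Int :=
  PySem.List.sorted (col.getD i []) (fun v => v) false

-- cons-form of A's loop
def pvGoA (col : List (List Int)) : List Int → List (List Int) → List Int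
  | [], _ => []
  | x :: rest, temp =>
    match col.findIdx? (fun ca => ca.contains x) with
    | some i =>
        (PySem.List.pyGet? (temp.getD i []) (-1)).getD 0
          :: pvGoA col rest (temp.set i (temp.getD i []).dropLast)
    | none => x :: pvGoA col rest temp

-- cons-form of B's loop, with the dictionary lookup already replaced by pvFirstIdx and Nat pointers
def pvGoB (sg : List (List Int)) (col : List (List Int)) : List Int → List Nat → List Int
  | [], _ => []
  | x :: rest, ptr =>
    match pvFirstIdx col x with
    | some i => (sg.getD i []).getD (ptr.getD i 0) 0 :: pvGoB sg col rest (ptr.set i (ptr.getD i 0 + 1))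
    | none => x :: pvGoB sg col rest ptr

lemma pvFoldA (col : List (List Int)) :
    ∀ (l : List Int) (acc : List Int) (temp : List (List Int)),
    (l.foldl
      (fun (st : List Int × List (List Int)) oa =>
        match col.findIdx? (fun ca => ca.contains oa) with
        | some i =>
            let t := st.2.getD i []
            (st.1 ++ [(PySem.List.pyGet? t (-1)).getD 0], st.2.set i t.dropLast)
        | none => (st.1 ++ [oa], st.2))
      (acc, temp)).1 = acc ++ pvGoA col l temp := by
  intro l
  induction l with
  | nil => intro acc temp; simp [pvGoA]
  | cons x rest ih =>
    intro acc temp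
    rw [List.foldl_cons]
    cases h : col.findIdx? (fun ca => ca.contains x) with
    | none =>
      simp only [h]
      rw [ih]
      simp only [pvGoA, h, List.append_assoc, List.singleton_append]
    | some i =>
      simp only [h]
      rw [ih]
      simp only [pvGoA, h, List.append_assoc, List.singleton_append]

lemma pvDictInner (ca : List Int) (i : Int) :
    ∀ (d : PySem.Dict Int Int) (x : Int),
    (ca.foldl (fun d v => d.setdefault v i) d).get? x
      = (d.get? x).or (if ca.contains x then some i else none) := by
  induction ca with
  | nil => intro d x; simp
  | cons v ca ih =>
    intro d x
    by_cases hx : x = v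
    · subst hx
      simp only [List.foldl_cons, ih, List.contains_cons, BEq.rfl, Bool.true_or, if_pos]
      rw [PySem.Dict.get?_setdefault_self]
      cases h : d.get? x with
      | none => simp [h]
      | some w => simp [h]
    · simp only [List.foldl_cons, ih, List.contains_cons]
      rw [PySem.Dict.get?_setdefault_of_ne d i hx]
      have : (x == v) = false := by simp [hx]
      simp [this]

lemma pvDictBuild :
    ∀ (gs : List (List Int)) (s : Int) (d : PySem.Dict Int Int) (x : Int),
    ((PySem.List.enumerate gs s).foldl
        (fun d p => p.2.foldl (fun d v => d.setdefault v p.1) d) d).get? x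
      = (d.get? x).or ((gs.findIdx? (fun ca => ca.contains x)).map (fun n => s + n)) := by
  intro gs
  induction gs with
  | nil => intro s d x; simp [PySem.List.enumerate]
  | cons ca gs ih =>
    intro s d x
    rw [PySem.List.enumerate_cons]
    simp only [List.foldl_cons]
    rw [ih, pvDictInner, List.findIdx?_cons]
    by_cases hc : ca.contains x
    · have hm : x ∈ ca := by simpa using hc
      cases hd : d.get? x <;> simp [hm, hd]
    · have hm : ¬ x ∈ ca := by simpa using hc
      cases hd : d.get? x with
      | some w => simp [hm, hd]
      | none =>
        cases hF : gs.findIdx? (fun ca => ca.contains x) with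
        | none => simp [hm, hF]
        | some n =>
          simp [hm, hF]
          ring

-- B's dictionary lookup computes the first containing group's index
lemma pvDictLookup (col : List (List Int)) (x : Int) :
    ((PySem.List.enumerate col 0).foldl
        (fun d p => p.2.foldl (fun d v => d.setdefault v p.1) d) PySem.Dict.empty).get? x
      = (pvFirstIdx col x).map (fun (n : Nat) => (n : Int)) := by
  rw [pvDictBuild]
  unfold pvFirstIdx
  cases hF : col.findIdx? (fun ca => ca.contains x) <;> simp [hF]

lemma pvMapGetD (ptr : List Nat) (n : Nat) :
    (ptr.map (fun (n : Nat) => (n : Int))).getD n 0 = (fun (n : Nat) => (n : Int)) (ptr.getD n 0) := by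
  rw [List.getD_eq_getElem?_getD, List.getD_eq_getElem?_getD, List.getElem?_map]
  cases h : ptr[n]? <;> simp [h]

lemma pvFoldB (sg col : List (List Int)) :
    ∀ (l : List Int) (acc : List Int) (ptr : List Nat),
    (l.foldl
      (fun (st : List Int × List Int) oa =>
        match ((PySem.List.enumerate col 0).foldl
            (fun d p => p.2.foldl (fun d v => d.setdefault v p.1) d) PySem.Dict.empty).get? oa with
        | none => (st.1 ++ [oa], st.2)
        | some i =>
            let p := st.2.getD i.toNat 0
            (st.1 ++ [(sg.getD i.toNat []).getD p.toNat 0], st.2.set i.toNat (p + 1)))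
      (acc, ptr.map (fun (n : Nat) => (n : Int)))).1 = acc ++ pvGoB sg col l ptr := by
  intro l
  induction l with
  | nil => intro acc ptr; simp [pvGoB]
  | cons x rest ih =>
    intro acc ptr
    rw [List.foldl_cons]
    cases h : pvFirstIdx col x with
    | none =>
      have hl := pvDictLookup col x
      rw [h] at hl
      simp only [hl, Option.map_none]
      rw [ih]
      simp [pvGoB, h]
    | some i =>
      have hl := pvDictLookup col x
      rw [h] at hl
      simp only [hl, Option.map_some]
      simp only [pvMapGetD, Int.toNat_natCast]
      have h3 : (ptr.map (fun (n : Nat) => (n : Int))).set i (((ptr.getD i 0 : Nat) : Int) + 1)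
          = (ptr.set i (ptr.getD i 0 + 1)).map (fun (n : Nat) => (n : Int)) := by
        rw [List.map_set]
        norm_cast
      rw [h3, ih]
      simp [pvGoB, h]

-- the main simulation: A's descending remainders against B's ascending lists with pointers
lemma pvMain (col : List (List Int)) :
    ∀ (l : List Int) (temp : List (List Int)) (ptr : List Nat),
    temp.length = col.length → ptr.length = col.length →
    (∀ i, i < col.length → temp.getD i [] = ((pvS col i).drop (ptr.getD i 0)).reverse) →
    (∀ i, i < col.length →
      ptr.getD i 0 + l.countP (fun x => decide (pvFirstIdx col x = some i)) ≤ (pvS col i).length) →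
    pvGoA col l temp = pvGoB (col.map (fun ca => PySem.List.sorted ca (fun v => v) false)) col l ptr := by
  intro l
  induction l with
  | nil => intro temp ptr _ _ _ _; simp [pvGoA, pvGoB]
  | cons x rest ih =>
    intro temp ptr hlt hlp hinv hbud
    cases h : pvFirstIdx col x with
    | none =>
      have hA : col.findIdx? (fun ca => ca.contains x) = none := h
      simp only [pvGoA, pvGoB, hA, h]
      congr 1
      apply ih temp ptr hlt hlp hinv
      intro i hi
      have := hbud i hi
      have hc : rest.countP (fun y => decide (pvFirstIdx col y = some i))
          = (x :: rest).countP (fun y => decide (pvFirstIdx col y = some i)) := by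
        rw [List.countP_cons]
        simp [h]
      omega
    | some i =>
      have hA : col.findIdx? (fun ca => ca.contains x) = some i := h
      have hi : i < col.length := by
        rcases List.findIdx?_eq_some_iff_getElem.mp hA with ⟨hlt', _⟩
        exact hlt'
      set k := ptr.getD i 0 with hk
      have hcount : (x :: rest).countP (fun y => decide (pvFirstIdx col y = some i))
          = rest.countP (fun y => decide (pvFirstIdx col y = some i)) + 1 := by
        rw [List.countP_cons]
        simp [h]
      have hklt : k < (pvS col i).length := by
        have := hbud i hi
        rw [hcount] at this
        omega
      have htempi : temp.getD i [] = ((pvS col i).drop k).reverse := hinv i hi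
      simp only [pvGoA, pvGoB, hA, h]
      -- heads agree
      have hhead : (PySem.List.pyGet? (temp.getD i []) (-1)).getD 0
          = ((col.map (fun ca => PySem.List.sorted ca (fun v => v) false)).getD i []).getD k 0 := by
        rw [htempi, PySem.List.pyGet?_neg_one, List.getLast?_reverse, List.head?_drop]
        have hmap : (col.map (fun ca => PySem.List.sorted ca (fun v => v) false)).getD i [] = pvS col i := by
          rw [List.getD_eq_getElem?_getD, List.getElem?_map]
          have : col[i]? = some (col.getD i []) := by
            rw [List.getD_eq_getElem?_getD]
            cases hcol : col[i]? with
            | none => exact absurd (List.getElem?_eq_none_iff.mp hcol) (by omega)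
            | some g => simp
          rw [this]
          simp only [Option.map_some, Option.getD_some, pvS]
        rw [hmap, List.getD_eq_getElem?_getD]
      rw [hhead]
      congr 1
      -- tails: apply the IH to the updated states
      apply ih
      · simp [hlt]
      · simp [hlp]
      · intro j hj
        by_cases hji : j = i
        · subst hji
          have hset : (temp.set j (temp.getD j []).dropLast).getD j [] = (temp.getD j []).dropLast := by
            rw [List.getD_eq_getElem?_getD, List.getElem?_set]
            simp [hlt ▸ hj]
          have hpset : (ptr.set j (k + 1)).getD j 0 = k + 1 := by
            rw [List.getD_eq_getElem?_getD, List.getElem?_set]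
            simp [hlp ▸ hj]
          rw [hset, hpset, htempi, List.dropLast_reverse, List.tail_drop]
        · have hset : (temp.set i (temp.getD i []).dropLast).getD j [] = temp.getD j [] := by
            rw [List.getD_eq_getElem?_getD, List.getElem?_set, List.getD_eq_getElem?_getD]
            simp [Ne.symm hji]
          have hpset : (ptr.set i (k + 1)).getD j 0 = ptr.getD j 0 := by
            rw [List.getD_eq_getElem?_getD, List.getElem?_set, List.getD_eq_getElem?_getD]
            simp [Ne.symm hji]
          rw [hset, hpset]
          exact hinv j hj
      · intro j hj
        by_cases hji : j = i
        · subst hji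
          have hpset : (ptr.set j (k + 1)).getD j 0 = k + 1 := by
            rw [List.getD_eq_getElem?_getD, List.getElem?_set]
            simp [hlp ▸ hj]
          have := hbud j hj
          rw [hcount] at this
          rw [hpset]
          omega
        · have hpset : (ptr.set i (k + 1)).getD j 0 = ptr.getD j 0 := by
            rw [List.getD_eq_getElem?_getD, List.getElem?_set, List.getD_eq_getElem?_getD]
            simp [Ne.symm hji]
          have := hbud j hj
          have hc : (x :: rest).countP (fun y => decide (pvFirstIdx col y = some j))
              = rest.countP (fun y => decide (pvFirstIdx col y = some j)) := by
            rw [List.countP_cons]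
            simp only [h]
            simp
            omega
          rw [hpset]
          omega

-- ===== VERDICT (by name: the statement is the Claim_ definition above) =====
theorem sortArrayByCollationArray_spec : Claim_equal_sortArrayByCollationArray := by
  unfold Claim_equal_sortArrayByCollationArray
  intro oa col _ hpre
  unfold Spec_sortArrayByCollationArray sortArrayByCollationArray sortArrayByCollationArray_alt
  simp only []
  rw [pvFoldA col oa []]
  have hrep : (List.replicate col.length (0 : Int))
      = (List.replicate col.length (0 : Nat)).map (fun (n : Nat) => (n : Int)) := by
    simp
  rw [hrep, pvFoldB _ col oa []]
  simp only [List.nil_append]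
  apply pvMain
  · simp
  · simp
  · intro i hi
    have h0 : (List.replicate col.length (0 : Nat)).getD i 0 = 0 := by
      rw [List.getD_eq_getElem?_getD, List.getElem?_replicate]
      simp [hi]
    rw [h0]
    simp only [List.drop_zero]
    rw [List.getD_eq_getElem?_getD, List.getElem?_map]
    have : col[i]? = some (col.getD i []) := by
      rw [List.getD_eq_getElem?_getD]
      cases hcol : col[i]? with
      | none => exact absurd (List.getElem?_eq_none_iff.mp hcol) (by omega)
      | some g => simp
    rw [this]
    simp only [Option.map_some, Option.getD_some, pvS]
  · intro i hi
    have h0 : (List.replicate col.length (0 : Nat)).getD i 0 = 0 := by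
      rw [List.getD_eq_getElem?_getD, List.getElem?_replicate]
      simp [hi]
    rw [h0]
    have := hpre i hi
    have hlen : (pvS col i).length = (col.getD i []).length := PySem.List.length_sorted _ _ _
    omega
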